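-- pv_equiv track=rewrite | github.com/jiyoony/CodeTree | 241105/물건 제거/remove-stuff.py | min_time_to_remove_items
-- ===== SOURCE A (Python) =====
-- def min_time_to_remove_items(n,nsize,k,ksize):
--     nsize.sort(reverse = True)
--     ksize.sort(reverse = True)
--
--     if ksize[0] > nsize[0]:
--         return -1
--
--     left,right = 1,k
--     answer = right # 시간을 기준으로 이분탐색
--
--     while left <= right:
--         mid = (left + right) // 2
--
--         # mid 시간내에 모든 물건을 제거 할 수 있는 지 체크
--         index = 0
--         for c in nsize:
--             for _ in range(mid):
--                 if index < k and ksize[index] <= c: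
--                     index += 1
--                 else:
--                     break
--
--         if index == k: # mid 시간내에 처리 가능
--             answer = mid
--             right = mid - 1
--         else:
--             left = mid + 1
--     return answer
-- ===== SOURCE B (Python) =====
-- def min_time_to_remove_items(n, nsize, k, ksize):
--     # NOTE: like the original, sorts nsize and ksize in place (same observable mutation).
--     nsize.sort(reverse=True)
--     ksize.sort(reverse=True)
--
--     if ksize[0] > nsize[0]:
--         return -1
--
--     # With both lists descending, in A's greedy a capable machine always takes
--     # min(t, items left) items, so t is feasible iff the first ceil(k/t)
--     # machines exist and machine i can lift item i*t --- an O(n) check.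
--     def feasible(t):
--         m = (k + t - 1) // t  # machines needed
--         if m > len(nsize):
--             return False
--         return all(nsize[i] >= ksize[i * t] for i in range(m))
--
--     lo, hi, ans = 1, k, k
--     while lo <= hi:
--         mid = (lo + hi) // 2
--         if feasible(mid):
--             ans = mid
--             hi = mid - 1
--         else:
--             lo = mid + 1
--     return ans
-- ===== Notes on version B (the rewrite author's own statement) =====
-- stated objective: faster
-- what changed: A simulates every machine item by item for mid steps inside each binary-search probe (O(n*mid) per probe); B replaces the simulation by a closed-form allocation on the two descending-sorted lists -- machine i is needed iff i*t < k and must satisfy nsize[i] >= ksize[i*t] -- so each probe is O(n).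
import Mathlib
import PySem

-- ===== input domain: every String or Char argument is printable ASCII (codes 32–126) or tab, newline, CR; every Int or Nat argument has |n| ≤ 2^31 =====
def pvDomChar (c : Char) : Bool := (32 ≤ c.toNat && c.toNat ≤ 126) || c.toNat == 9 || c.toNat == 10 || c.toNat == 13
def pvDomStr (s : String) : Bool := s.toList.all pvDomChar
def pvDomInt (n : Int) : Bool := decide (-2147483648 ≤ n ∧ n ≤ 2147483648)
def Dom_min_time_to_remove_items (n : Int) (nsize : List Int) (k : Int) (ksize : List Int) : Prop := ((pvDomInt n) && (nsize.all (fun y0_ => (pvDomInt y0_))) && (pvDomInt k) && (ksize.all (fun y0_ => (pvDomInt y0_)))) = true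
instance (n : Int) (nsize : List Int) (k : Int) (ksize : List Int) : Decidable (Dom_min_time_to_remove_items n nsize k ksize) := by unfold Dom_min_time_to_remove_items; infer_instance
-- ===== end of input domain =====

-- B replaces A's O(k)-per-machine inner simulation by an O(1) closed-form allocation per machine,
-- making each feasibility check O(n) instead of O(n*mid); equality of RETURN values is proved
-- (both Pythons also sort their two list arguments in place, an identical side effect).

-- ===== PORT A =====

-- inner loop: `for _ in range(mid): if index < k and ksize[index] <= c: index += 1 else: break`
-- (where Python would raise IndexError — pyGet? = none — the port leaves index unchanged; excluded by Pre_)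
def pyCheckInner (ksize : List Int) (k c : Int) : Nat → Int → Int
  | 0, idx => idx
  | t + 1, idx =>
    if idx < k then
      match PySem.List.pyGet? ksize idx with
      | some v => if v ≤ c then pyCheckInner ksize k c t (idx + 1) else idx
      | none => idx
    else idx

-- `index = 0; for c in nsize: <inner loop>`
def pyRemoveCount (nsize ksize : List Int) (k mid : Int) : Int :=
  nsize.foldl (fun idx c => pyCheckInner ksize k c mid.toNat idx) 0

-- A's `while left <= right` binary search (mid = (left+right)//2)
def loopA (nsize ksize : List Int) (k left right answer : Int) : Int :=
  if h : left ≤ right then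
    if pyRemoveCount nsize ksize k (PySem.Int.floordiv (left + right) 2) = k then
      loopA nsize ksize k left (PySem.Int.floordiv (left + right) 2 - 1)
        (PySem.Int.floordiv (left + right) 2)
    else
      loopA nsize ksize k (PySem.Int.floordiv (left + right) 2 + 1) right answer
  else answer
termination_by (right + 1 - left).toNat
decreasing_by
  · have := PySem.Int.floordiv_two_mid_bounds h; omega
  · have := PySem.Int.floordiv_two_mid_bounds h; omega

-- guard `if ksize[0] > nsize[0]: return -1` then the binary search; the `| _, _` arm is
-- where Python raises IndexError on an empty list (excluded by Pre_)
def pyMainA (ns : List Int) (k : Int) (ks : List Int) : Int :=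
  match PySem.List.pyGet? ks 0, PySem.List.pyGet? ns 0 with
  | some k0, some n0 => if k0 > n0 then -1 else loopA ns ks k 1 k k
  | _, _ => 0

def min_time_to_remove_items (n : Int) (nsize : List Int) (k : Int) (ksize : List Int) : Int :=
  pyMainA (PySem.List.sorted nsize (fun x => x) true) k (PySem.List.sorted ksize (fun x => x) true)

-- ===== PORT B =====

-- `m = (k + t - 1) // t; m <= len(nsize) and all(nsize[i] >= ksize[i*t] for i in range(m))`
-- (where Python would raise IndexError — pyGet? = none — the port yields false; excluded by Pre_)
def feasibleB (nsize ksize : List Int) (k t : Int) : Bool :=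
  if PySem.Int.floordiv (k + t - 1) t > (nsize.length : Int) then false
  else
    (PySem.List.pyRange 0 (PySem.Int.floordiv (k + t - 1) t)).all fun i =>
      match PySem.List.pyGet? nsize i, PySem.List.pyGet? ksize (i * t) with
      | some a, some b => decide (b ≤ a)
      | _, _ => false

-- B's `while lo <= hi` binary search
def loopB (nsize ksize : List Int) (k lo hi ans : Int) : Int :=
  if h : lo ≤ hi then
    if feasibleB nsize ksize k (PySem.Int.floordiv (lo + hi) 2) then
      loopB nsize ksize k lo (PySem.Int.floordiv (lo + hi) 2 - 1)
        (PySem.Int.floordiv (lo + hi) 2)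
    else
      loopB nsize ksize k (PySem.Int.floordiv (lo + hi) 2 + 1) hi ans
  else ans
termination_by (hi + 1 - lo).toNat
decreasing_by
  · have := PySem.Int.floordiv_two_mid_bounds h; omega
  · have := PySem.Int.floordiv_two_mid_bounds h; omega

def pyMainB (ns : List Int) (k : Int) (ks : List Int) : Int :=
  match PySem.List.pyGet? ks 0, PySem.List.pyGet? ns 0 with
  | some k0, some n0 => if k0 > n0 then -1 else loopB ns ks k 1 k k
  | _, _ => 0

def min_time_to_remove_items_alt (n : Int) (nsize : List Int) (k : Int) (ksize : List Int) : Int :=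
  pyMainB (PySem.List.sorted nsize (fun x => x) true) k (PySem.List.sorted ksize (fun x => x) true)

-- ===== PRECONDITION & SPEC =====

-- Pre_ excludes exactly the inputs on which A raises IndexError: an empty nsize or ksize, and
-- inputs asking for k > len(ksize) items unless some item exceeds every machine (in which case the
-- guard returns -1 before any indexing); on every other such input the binary search indexes
-- ksize out of range.
def Pre_min_time_to_remove_items (n : Int) (nsize : List Int) (k : Int) (ksize : List Int) : Prop :=
  nsize ≠ [] ∧ ksize ≠ [] ∧ (k ≤ (ksize.length : Int) ∨ ∃ x ∈ ksize, ∀ y ∈ nsize, y < x)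
instance (n : Int) (nsize : List Int) (k : Int) (ksize : List Int) : Decidable (Pre_min_time_to_remove_items n nsize k ksize) := by unfold Pre_min_time_to_remove_items; infer_instance

def pvWitness_min_time_to_remove_items : Int × List Int × Int × List Int := (1, [5], 1, [3])

def Spec_min_time_to_remove_items (n : Int) (nsize : List Int) (k : Int) (ksize : List Int) (out : Int) : Prop := out = min_time_to_remove_items_alt n nsize k ksize
instance (n : Int) (nsize : List Int) (k : Int) (ksize : List Int) (out : Int) : Decidable (Spec_min_time_to_remove_items n nsize k ksize out) := by unfold Spec_min_time_to_remove_items; infer_instance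

-- ===== CLAIM (what is proved, stated in full; the proofs are below) =====
def Claim_equal_min_time_to_remove_items : Prop := ∀ (n : Int) (nsize : List Int) (k : Int) (ksize : List Int), Dom_min_time_to_remove_items n nsize k ksize → Pre_min_time_to_remove_items n nsize k ksize → Spec_min_time_to_remove_items n nsize k ksize (min_time_to_remove_items n nsize k ksize)

-- ===== LEMMAS AND PROOFS =====

-- what both feasibility checks assert, seen from an intermediate state s (s items already removed)
def okFrom (ns ks : List Int) (k t s : Int) : Prop :=
  PySem.Int.floordiv (k - s + t - 1) t ≤ (ns.length : Int) ∧
  ∀ i : Int, 0 ≤ i → i < PySem.Int.floordiv (k - s + t - 1) t →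
    ∃ a b, PySem.List.pyGet? ns i = some a ∧ PySem.List.pyGet? ks (s + i * t) = some b ∧ b ≤ a

lemma checkInner_stuck (ks : List Int) (k c : Int) (t : Nat) (idx : Int) (h : ¬ idx < k) :
    pyCheckInner ks k c t idx = idx := by
  cases t <;> simp [pyCheckInner, h]

lemma checkInner_blocked (ks : List Int) (k c : Int) (t : Nat) (idx v : Int)
    (hg : PySem.List.pyGet? ks idx = some v) (hv : ¬ v ≤ c) :
    pyCheckInner ks k c t idx = idx := by
  cases t <;> simp [pyCheckInner, hg, hv]

lemma pairwise_ge_getElem {l : List Int} (h : l.Pairwise (fun a b => b ≤ a)) {i j : Nat}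
    (hij : i ≤ j) (hj : j < l.length) : l[j] ≤ l[i] := by
  rcases Nat.eq_or_lt_of_le hij with rfl | hlt
  · exact le_refl _
  · exact List.pairwise_iff_getElem.mp h i j (by omega) hj hlt

-- a capable machine takes min(t, k - idx) items
lemma checkInner_run (ks : List Int) (k c : Int) (hlen : k ≤ (ks.length : Int))
    (hp : ks.Pairwise (fun a b => b ≤ a)) :
    ∀ (t : Nat) (idx v : Int), 0 ≤ idx → idx < k →
      PySem.List.pyGet? ks idx = some v → v ≤ c →
      pyCheckInner ks k c t idx = min (idx + t) k := by
  intro t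
  induction t with
  | zero => intro idx v h0 hik _ _; simp [pyCheckInner]; omega
  | succ t ih =>
    intro idx v h0 hik hg hvc
    simp only [pyCheckInner, hik, hg, hvc, if_pos]
    by_cases h2 : idx + 1 < k
    · have h0' : (0 : Int) ≤ idx + 1 := by omega
      have hlt' : idx + 1 < (ks.length : Int) := by omega
      have hg' : PySem.List.pyGet? ks (idx + 1) = some ks[(idx + 1).toNat] :=
        PySem.List.pyGet?_eq_some_getElem ks h0' hlt'
      have hgv : PySem.List.pyGet? ks idx = some ks[idx.toNat] :=
        PySem.List.pyGet?_eq_some_getElem ks h0 (by omega)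
      have hvv : v = ks[idx.toNat] := by rw [hg] at hgv; exact (Option.some.inj hgv)
      have hle : ks[(idx + 1).toNat] ≤ ks[idx.toNat] :=
        pairwise_ge_getElem hp (by omega) (by omega)
      rw [ih (idx + 1) ks[(idx + 1).toNat] h0' h2 hg' (by omega)]
      push_cast
      omega
    · rw [checkInner_stuck ks k c t (idx + 1) (by omega)]
      push_cast
      omega

-- once index = k, every later machine leaves it unchanged
lemma foldl_stuck (ks : List Int) (k : Int) (tn : Nat) :
    ∀ (ns : List Int) (s : Int), ¬ s < k →
      ns.foldl (fun idx c => pyCheckInner ks k c tn idx) s = s := by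
  intro ns
  induction ns with
  | nil => intro s _; rfl
  | cons c rest ih =>
    intro s hs
    simp only [List.foldl_cons, checkInner_stuck ks k c tn s hs]
    exact ih s hs

-- once a machine cannot lift the current item, no smaller machine can either
lemma foldl_blocked (ks : List Int) (k : Int) (tn : Nat) :
    ∀ (ns : List Int) (s c v : Int), PySem.List.pyGet? ks s = some v → (∀ r ∈ ns, r ≤ c) →
      ¬ v ≤ c → ns.foldl (fun idx c => pyCheckInner ks k c tn idx) s = s := by
  intro ns
  induction ns with
  | nil => intro s c v _ _ _; rfl
  | cons r rest ih =>
    intro s c v hg hall hv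
    have hr : r ≤ c := hall r (by simp)
    simp only [List.foldl_cons, checkInner_blocked ks k r tn s v hg (by omega)]
    exact ih s c v hg (fun q hq => hall q (by simp [hq])) hv

-- arithmetic about m = ceil((k - s)/t) = (k - s + t - 1) // t, t ≥ 1
lemma m_nonpos {k t s : Int} (ht : 1 ≤ t) (h : k ≤ s) :
    PySem.Int.floordiv (k - s + t - 1) t ≤ 0 := by
  have := (PySem.Int.floordiv_lt_iff_lt_mul (a := k - s + t - 1) (b := t) (q := 1) (by omega)).mpr (by omega)
  omega

lemma m_pos {k t s : Int} (ht : 1 ≤ t) (h : s < k) :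
    1 ≤ PySem.Int.floordiv (k - s + t - 1) t :=
  (PySem.Int.le_floordiv_iff_mul_le (by omega)).mpr (by omega)

lemma m_one {k t s : Int} (ht : 1 ≤ t) (h1 : s < k) (h2 : k ≤ s + t) :
    PySem.Int.floordiv (k - s + t - 1) t = 1 :=
  (PySem.Int.floordiv_eq_iff_of_pos (by omega)).mpr (by constructor <;> omega)

lemma m_shift {k t s : Int} (ht : 1 ≤ t) :
    PySem.Int.floordiv (k - (s + t) + t - 1) t = PySem.Int.floordiv (k - s + t - 1) t - 1 := by
  have h1 : k - (s + t) + t - 1 = (k - s + t - 1) + (-1) * t := by ring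
  rw [h1, PySem.Int.floordiv_eq_ediv_of_pos (by omega), PySem.Int.floordiv_eq_ediv_of_pos (by omega),
    Int.add_mul_ediv_right _ _ (by omega : t ≠ 0)]
  omega

lemma pyGet?_cons_shift {α : Type} (x : α) (xs : List α) (i : Int) (hi : 0 ≤ i) :
    PySem.List.pyGet? (x :: xs) (i + 1) = PySem.List.pyGet? xs i := by
  obtain ⟨n, rfl⟩ := Int.eq_ofNat_of_zero_le hi
  exact PySem.List.pyGet?_cons_succ x xs n

-- consuming the head machine shifts okFrom by one machine and t items
lemma okFrom_cons (ks : List Int) (k t s c v : Int) (ht : 1 ≤ t) (hs : s < k)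
    (hv : PySem.List.pyGet? ks s = some v) (hvc : v ≤ c) (rest : List Int) :
    okFrom (c :: rest) ks k t s ↔ okFrom rest ks k t (s + t) := by
  have hm1 : 1 ≤ PySem.Int.floordiv (k - s + t - 1) t := m_pos ht hs
  have hsh := m_shift (k := k) (s := s) ht
  constructor
  · rintro ⟨h1, h2⟩
    refine ⟨by simp only [List.length_cons] at h1; push_cast at h1 ⊢; omega, ?_⟩
    intro i hi0 hilt
    obtain ⟨a, b, ha, hb, hba⟩ := h2 (i + 1) (by omega) (by omega)
    refine ⟨a, b, ?_, ?_, hba⟩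
    · rw [pyGet?_cons_shift c rest i hi0] at ha; exact ha
    · have : s + (i + 1) * t = s + t + i * t := by ring
      rw [this] at hb; exact hb
  · rintro ⟨h1, h2⟩
    refine ⟨by simp only [List.length_cons]; push_cast at h1 ⊢; omega, ?_⟩
    intro i hi0 hilt
    by_cases hi : i = 0
    · subst hi
      exact ⟨c, v, PySem.List.pyGet?_zero_cons c rest, by simpa using hv, hvc⟩
    · obtain ⟨a, b, ha, hb, hba⟩ := h2 (i - 1) (by omega) (by omega)
      refine ⟨a, b, ?_, ?_, hba⟩
      · have : i = (i - 1) + 1 := by omega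
        rw [this, pyGet?_cons_shift c rest (i - 1) (by omega)]; exact ha
      · have : s + i * t = s + t + (i - 1) * t := by ring
        rw [this]; exact hb

-- the heart of the proof: A's greedy simulation reaches k exactly when B's closed-form check holds
lemma fold_iff (ks : List Int) (k t : Int) (ht : 1 ≤ t) (hlen : k ≤ (ks.length : Int))
    (hp : ks.Pairwise (fun a b => b ≤ a)) :
    ∀ (ns : List Int), ns.Pairwise (fun a b => b ≤ a) → ∀ s : Int, 0 ≤ s → s ≤ k →
      (ns.foldl (fun idx c => pyCheckInner ks k c t.toNat idx) s = k ↔ okFrom ns ks k t s) := by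
  intro ns
  induction ns with
  | nil =>
    intro _ s h0 hsk
    simp only [List.foldl_nil, okFrom, List.length_nil, Nat.cast_zero]
    constructor
    · rintro rfl
      have hm := m_nonpos (k := s) (s := s) ht le_rfl
      exact ⟨hm, fun i hi0 hilt => absurd hilt (by omega)⟩
    · rintro ⟨h1, _⟩
      by_contra hne
      have := m_pos (k := k) (s := s) ht (by omega)
      omega
  | cons c rest ih =>
    intro hpn s h0 hsk
    have hpc : ∀ r ∈ rest, r ≤ c := (List.pairwise_cons.mp hpn).1
    have hprest : rest.Pairwise (fun a b => b ≤ a) := (List.pairwise_cons.mp hpn).2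
    simp only [List.foldl_cons]
    by_cases hs : s < k
    · have hv : PySem.List.pyGet? ks s = some ks[s.toNat] :=
        PySem.List.pyGet?_eq_some_getElem ks h0 (by omega)
      by_cases hvc : ks[s.toNat] ≤ c
      · have htn : ((t.toNat : Int)) = t := by omega
        rw [checkInner_run ks k c hlen hp t.toNat s ks[s.toNat] h0 hs hv hvc, htn]
        by_cases hks : k ≤ s + t
        · have hmin : min (s + t) k = k := by omega
          rw [hmin, foldl_stuck ks k t.toNat rest k (by omega)]
          have hm1 : PySem.Int.floordiv (k - s + t - 1) t = 1 := m_one ht hs hks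
          constructor
          · intro _
            refine ⟨by rw [hm1]; simp only [List.length_cons]; push_cast; omega, ?_⟩
            intro i hi0 hilt
            have : i = 0 := by omega
            subst this
            exact ⟨c, ks[s.toNat], PySem.List.pyGet?_zero_cons c rest, by simpa using hv, hvc⟩
          · intro _; rfl
        · have hmin : min (s + t) k = s + t := by omega
          rw [hmin, ih hprest (s + t) (by omega) (by omega)]
          exact (okFrom_cons ks k t s c ks[s.toNat] ht hs hv hvc rest).symm
      · rw [checkInner_blocked ks k c t.toNat s ks[s.toNat] hv hvc,
          foldl_blocked ks k t.toNat rest s c ks[s.toNat] hv hpc hvc]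
        constructor
        · intro h; omega
        · rintro ⟨_, h2⟩
          obtain ⟨a, b, ha, hb, hba⟩ := h2 0 le_rfl (by have := m_pos ht hs; omega)
          rw [PySem.List.pyGet?_zero_cons] at ha
          rw [show s + 0 * t = s by ring] at hb
          rw [hv] at hb
          rw [← Option.some.inj ha, ← Option.some.inj hb] at hba
          omega
    · have hse : s = k := by omega
      rw [checkInner_stuck ks k c t.toNat s hs, foldl_stuck ks k t.toNat rest s hs]
      subst hse
      constructor
      · intro _
        have hm := m_nonpos (k := s) (s := s) ht le_rfl
        exact ⟨le_trans hm (by positivity), fun i hi0 hilt => absurd hilt (by omega)⟩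
      · intro _; rfl

-- B's boolean check is okFrom at s = 0
lemma feasibleB_iff (ns ks : List Int) (k t : Int) :
    feasibleB ns ks k t = true ↔ okFrom ns ks k t 0 := by
  have hz : k - 0 + t - 1 = k + t - 1 := by ring
  unfold feasibleB okFrom
  rw [hz]
  split_ifs with hm
  · simp only [false_iff]
    rintro ⟨h1, _⟩; omega
  · rw [List.all_eq_true]
    constructor
    · intro h
      refine ⟨by omega, ?_⟩
      intro i hi0 hilt
      have hmem : i ∈ PySem.List.pyRange 0 (PySem.Int.floordiv (k + t - 1) t) :=
        PySem.List.mem_pyRange_one.mpr ⟨hi0, hilt⟩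
      have := h i hmem
      cases ha : PySem.List.pyGet? ns i with
      | none => rw [ha] at this; simp at this
      | some a =>
        cases hb : PySem.List.pyGet? ks (i * t) with
        | none => rw [ha, hb] at this; simp at this
        | some b =>
          rw [ha, hb] at this
          simp at this
          exact ⟨a, b, rfl, by simpa using hb, this⟩
    · rintro ⟨_, h2⟩ i hmem
      obtain ⟨hi0, hilt⟩ := PySem.List.mem_pyRange_one.mp hmem
      obtain ⟨a, b, ha, hb, hba⟩ := h2 i hi0 hilt
      rw [ha, show (0 : Int) + i * t = i * t by ring] at *
      rw [show PySem.List.pyGet? ks (i * t) = some b from by simpa using hb]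
      simpa using hba

-- the two binary searches agree step for step
lemma loop_eq (ns ks : List Int) (k : Int) (hk : 0 ≤ k) (hlen : k ≤ (ks.length : Int))
    (hpk : ks.Pairwise (fun a b => b ≤ a)) (hpn : ns.Pairwise (fun a b => b ≤ a)) :
    ∀ (N : Nat) (l r a : Int), (r + 1 - l).toNat ≤ N → 1 ≤ l →
      loopA ns ks k l r a = loopB ns ks k l r a := by
  intro N
  induction N with
  | zero =>
    intro l r a hN hl
    rw [loopA, loopB]
    have : ¬ l ≤ r := by omega
    simp [this]
  | succ N ih =>
    intro l r a hN hl
    rw [loopA, loopB]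
    by_cases hlr : l ≤ r
    · have hmid := PySem.Int.floordiv_two_mid_bounds hlr
      have hiff : (pyRemoveCount ns ks k (PySem.Int.floordiv (l + r) 2) = k) ↔
          (feasibleB ns ks k (PySem.Int.floordiv (l + r) 2) = true) := by
        rw [pyRemoveCount,
          fold_iff ks k (PySem.Int.floordiv (l + r) 2) (by omega) hlen hpk ns hpn 0 le_rfl hk,
          feasibleB_iff ns ks k (PySem.Int.floordiv (l + r) 2)]
      rw [dif_pos hlr, dif_pos hlr]
      by_cases hfe : pyRemoveCount ns ks k (PySem.Int.floordiv (l + r) 2) = k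
      · rw [if_pos hfe, if_pos (hiff.mp hfe)]
        exact ih l (PySem.Int.floordiv (l + r) 2 - 1) (PySem.Int.floordiv (l + r) 2) (by omega) hl
      · rw [if_neg hfe, if_neg (fun h => hfe (hiff.mpr h))]
        exact ih (PySem.Int.floordiv (l + r) 2 + 1) r a (by omega) (by omega)
    · rw [dif_neg hlr, dif_neg hlr]

lemma main_eq (ns ks : List Int) (k : Int) (hpk : ks.Pairwise (fun a b => b ≤ a))
    (hpn : ns.Pairwise (fun a b => b ≤ a))
    (hdisj : k ≤ (ks.length : Int) ∨ ∃ x ∈ ks, ∀ y ∈ ns, y < x) :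
    pyMainA ns k ks = pyMainB ns k ks := by
  cases ks with
  | nil => rfl
  | cons k0 kt =>
    cases ns with
    | nil =>
      have h2 : PySem.List.pyGet? ([] : List Int) (0 : Int) = none := by decide
      cases h : PySem.List.pyGet? ((k0 :: kt) : List Int) (0 : Int) <;>
        simp [pyMainA, pyMainB, h2]
    | cons n0 nt =>
      simp only [pyMainA, pyMainB, PySem.List.pyGet?_zero_cons]
      by_cases hg : k0 > n0
      · simp [hg]
      · simp only [hg, if_false]
        have hlen : k ≤ (((k0 :: kt).length : Nat) : Int) := by
          rcases hdisj with h | ⟨x, hx, hall⟩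
          · exact h
          · exfalso
            have hxk0 : x ≤ k0 := by
              rcases List.mem_cons.mp hx with rfl | hxt
              · exact le_refl x
              · exact (List.pairwise_cons.mp hpk).1 x hxt
            have := hall n0 (by simp)
            omega
        by_cases hk0 : 0 ≤ k
        · exact loop_eq (n0 :: nt) (k0 :: kt) k hk0 hlen hpk hpn (k + 1 - 1).toNat 1 k k
            (by omega) le_rfl
        · rw [loopA, loopB]
          have : ¬ (1 : Int) ≤ k := by omega
          simp [this]

-- ===== VERDICT (by name: the statement is the Claim_ definition above) =====
theorem min_time_to_remove_items_spec : Claim_equal_min_time_to_remove_items := by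
  intro n nsize k ksize _hdom hpre
  obtain ⟨hn, hk, hdisj⟩ := hpre
  show min_time_to_remove_items n nsize k ksize = min_time_to_remove_items_alt n nsize k ksize
  unfold min_time_to_remove_items min_time_to_remove_items_alt
  apply main_eq
  · exact PySem.List.sorted_pairwise_rev ksize (fun x => x)
  · exact PySem.List.sorted_pairwise_rev nsize (fun x => x)
  · rcases hdisj with h | ⟨x, hx, hall⟩
    · left
      rw [PySem.List.length_sorted]
      exact h
    · right
      exact ⟨x, (PySem.List.mem_sorted ksize (fun x => x) true x).mpr hx,
        fun y hy => hall y ((PySem.List.mem_sorted nsize (fun x => x) true y).mp hy)⟩
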